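-- pv_equiv track=rewrite | github.com/Kacyk27/python-unittest-learning | 100+ Exercises course/solution85.py | map_longest
-- ===== SOURCE A (Python) =====
-- def map_longest(words):
--     if words == []:
--         return 0
--     else:
--         x=[]
--         for i in words:
--             x.append(len(i))
--         return max(x)
-- ===== SOURCE B (Python) =====
-- def map_longest(words):
--     best = 0
--     for w in words:
--         if len(w) > best:
--             best = len(w)
--     return best
-- ===== Notes on version B (the rewrite author's own statement) =====
-- stated objective: simpler
-- what changed: Replaces the empty-list guard plus intermediate length list plus max() with a single running-maximum loop seeded at 0 (lengths are non-negative, so the 0 seed preserves the empty-input result).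
import Mathlib
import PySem

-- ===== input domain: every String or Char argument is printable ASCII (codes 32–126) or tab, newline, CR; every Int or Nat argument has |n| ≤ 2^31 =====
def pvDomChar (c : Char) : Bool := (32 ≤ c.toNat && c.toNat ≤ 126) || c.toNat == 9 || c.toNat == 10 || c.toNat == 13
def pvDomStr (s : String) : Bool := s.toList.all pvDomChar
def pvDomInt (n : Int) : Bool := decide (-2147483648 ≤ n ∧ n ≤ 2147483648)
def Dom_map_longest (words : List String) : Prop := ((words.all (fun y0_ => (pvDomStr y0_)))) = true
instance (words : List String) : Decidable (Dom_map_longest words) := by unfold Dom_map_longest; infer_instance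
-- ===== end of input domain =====

-- B replaces A's guard + intermediate length list + max() by a single running-maximum loop seeded at 0 (simpler).

-- ===== PORT A =====
def map_longest (words : List String) : Int :=
  if words = [] then 0
  else
    -- x = []; for i in words: x.append(len(i))
    let x : List Int := words.foldl (fun acc i => acc ++ [PySem.Str.len i]) []
    -- return max(x)  (x is nonempty here; max of a nonempty list)
    (PySem.List.max? x (fun y => y)).getD 0

-- ===== PORT B =====
def map_longest_alt (words : List String) : Int :=
  words.foldl (fun best w => if PySem.Str.len w > best then PySem.Str.len w else best) 0

-- ===== PRECONDITION & SPEC =====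
def Spec_map_longest (words : List String) (out : Int) : Prop := out = map_longest_alt words
instance (words : List String) (out : Int) : Decidable (Spec_map_longest words out) := by unfold Spec_map_longest; infer_instance

-- ===== CLAIM (what is proved, stated in full; the proofs are below) =====
def Claim_equal_map_longest : Prop := ∀ (words : List String), Dom_map_longest words → Spec_map_longest words (map_longest words)

-- ===== LEMMAS AND PROOFS =====

theorem pv_len_nonneg (s : String) : 0 ≤ PySem.Str.len s := by
  simp

theorem pv_append_lens (t : List String) (acc : List Int) :
    t.foldl (fun acc i => acc ++ [PySem.Str.len i]) acc = acc ++ t.map PySem.Str.len := by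
  induction t generalizing acc with
  | nil => simp
  | cons h tl ih => rw [List.foldl_cons, ih]; simp

theorem pv_alt_foldl_max (t : List String) (a : Int) :
    t.foldl (fun best w => if PySem.Str.len w > best then PySem.Str.len w else best) a
      = (t.map PySem.Str.len).foldl max a := by
  induction t generalizing a with
  | nil => rfl
  | cons h tl ih =>
      simp only [List.foldl_cons, List.map]
      rw [ih]
      congr 1
      simp only [PySem.Str.len_eq, gt_iff_lt]
      split_ifs <;> omega

-- ===== VERDICT (by name: the statement is the Claim_ definition above) =====
theorem map_longest_spec : Claim_equal_map_longest := by
  intro words _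
  unfold Spec_map_longest map_longest map_longest_alt
  cases words with
  | nil => rfl
  | cons h t =>
      simp only [reduceCtorEq, if_false, pv_append_lens, List.nil_append, List.map]
      rw [PySem.List.max?_id_cons, Option.getD_some, pv_alt_foldl_max, List.map_cons, List.foldl_cons,
        max_eq_right (pv_len_nonneg h)]
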